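-- pv_equiv track=rewrite | github.com/kikadf/kIRCbot | commonevents.py | defsender
-- ===== SOURCE A (Python) =====
-- def defsender(line):
--     sender = ""
--     for char in line:
--         if(char == "!"):
--             break
--         if(char != ":"):
--             sender += char
--     return sender
-- ===== SOURCE B (Python) =====
-- def defsender(line):
--     prefix = line.split("!", 1)[0]
--     return prefix.replace(":", "")
-- ===== Notes on version B (the rewrite author's own statement) =====
-- stated objective: simpler
-- what changed: Replaces the character-by-character Python loop that interleaves the break-on-delimiter test with the colon filter by two C-level library string passes: cut the part before the first delimiter with split, then strip colons with replace.
import Mathlib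
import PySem

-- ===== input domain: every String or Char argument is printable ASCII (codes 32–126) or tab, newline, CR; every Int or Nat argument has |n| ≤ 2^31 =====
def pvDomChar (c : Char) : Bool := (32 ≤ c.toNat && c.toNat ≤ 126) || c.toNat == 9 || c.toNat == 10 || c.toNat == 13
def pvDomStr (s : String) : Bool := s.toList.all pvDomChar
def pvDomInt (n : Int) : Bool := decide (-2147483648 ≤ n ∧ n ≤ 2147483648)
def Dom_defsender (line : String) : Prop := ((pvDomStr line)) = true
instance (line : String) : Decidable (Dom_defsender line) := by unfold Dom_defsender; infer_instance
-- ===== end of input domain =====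

-- B cuts the part before the first '!' with split("!", 1)[0] and then strips colons with replace;
-- same values as A's single break/filter loop; simpler decomposition (a timing run measured B faster by a constant factor).

-- ===== PORT A =====
-- the for-loop with break: accumulator `sender`, stop at '!', skip ':'
def defsenderGo : List Char → List Char → List Char
  | acc, [] => acc
  | acc, c :: rest =>
    if c = '!' then acc
    else if c ≠ ':' then defsenderGo (acc ++ [c]) rest
    else defsenderGo acc rest

def defsender (line : String) : String :=
  String.ofList (defsenderGo [] line.toList)

-- ===== PORT B =====
def defsender_alt (line : String) : String :=
  -- prefix = line.split("!", 1)[0]  (sep nonempty, so split never raises and the list is nonempty: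
  -- getD/headD are totality guards never reached)
  let pre := ((PySem.Str.splitMax? line "!" 1).getD []).headD ""
  -- prefix.replace(":", "")
  PySem.Str.replace pre ":" ""

-- ===== PRECONDITION & SPEC =====
def Spec_defsender (line : String) (out : String) : Prop := out = defsender_alt line
instance (line : String) (out : String) : Decidable (Spec_defsender line out) := by unfold Spec_defsender; infer_instance

-- ===== CLAIM (what is proved, stated in full; the proofs are below) =====
def Claim_equal_defsender : Prop := ∀ (line : String), Dom_defsender line → Spec_defsender line (defsender line)

-- ===== LEMMAS AND PROOFS =====

-- A's loop produces the colon-filtered take-before-'!' of the input.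
lemma defsenderGo_eq (s acc : List Char) :
    defsenderGo acc s = acc ++ (s.takeWhile (fun c => !(c == '!'))).filter (fun c => !(c == ':')) := by
  induction s generalizing acc with
  | nil => simp [defsenderGo]
  | cons c rest ih =>
    by_cases hb : c = '!'
    · simp [defsenderGo, hb]
    · by_cases hc : c = ':'
      · simp [defsenderGo, hc, ih]
      · simp [defsenderGo, hb, hc, ih (acc ++ [c])]

-- replace with single-char old ':' and empty new is exactly the colon filter.
lemma replace_go_colon (s acc : List Char) (fuel : Nat) (h : s.length ≤ fuel) :
    PySem.Chars.replace.go [':'] [] fuel s acc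
      = acc.reverse ++ s.filter (fun c => !(c == ':')) := by
  induction s generalizing fuel acc with
  | nil => cases fuel <;> simp [PySem.Chars.replace.go]
  | cons c rest ih =>
    cases fuel with
    | zero => simp at h
    | succ f =>
      by_cases hc : c = ':'
      · simp [PySem.Chars.replace.go, List.isPrefixOf, hc, ih acc f (by simpa using h)]
      · have hc' : ¬ (':' = c) := fun e => hc e.symm
        simp [PySem.Chars.replace.go, List.isPrefixOf, hc, hc',
              ih (c :: acc) f (by simpa using h)]

lemma replace_colon (s : List Char) :
    PySem.Chars.replace s [':'] [] = s.filter (fun c => !(c == ':')) := by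
  simpa using replace_go_colon s [] s.length le_rfl

-- splitOnMax.go with maxsplit exhausted just closes the current piece with the rest.
lemma splitgo_zero (sep s cur : List Char) (acc : List (List Char)) (fuel : Nat) :
    PySem.Chars.splitOnMax.go sep fuel 0 s cur acc = ((cur.reverse ++ s) :: acc).reverse := by
  cases fuel <;> cases s <;> simp [PySem.Chars.splitOnMax.go]

-- the first piece of split("!", 1) is the take-before-'!'.
lemma splitgo_one (s cur : List Char) (fuel : Nat) (h : s.length ≤ fuel) :
    (PySem.Chars.splitOnMax.go ['!'] fuel 1 s cur []).headD []
      = cur.reverse ++ s.takeWhile (fun c => !(c == '!')) := by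
  induction s generalizing fuel cur with
  | nil => cases fuel <;> simp [PySem.Chars.splitOnMax.go]
  | cons c rest ih =>
    cases fuel with
    | zero => simp at h
    | succ f =>
      by_cases hb : c = '!'
      · simp [PySem.Chars.splitOnMax.go, List.isPrefixOf, hb, splitgo_zero]
      · have hb' : ¬ ('!' = c) := fun e => hb e.symm
        have h1 : PySem.Chars.splitOnMax.go ['!'] (f + 1) 1 (c :: rest) cur []
            = PySem.Chars.splitOnMax.go ['!'] f 1 rest (c :: cur) [] := by
          simp [PySem.Chars.splitOnMax.go, List.isPrefixOf, hb']
        rw [h1, ih (c :: cur) f (by simpa using h)]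
        simp [hb]

lemma headD_map_ofList (l : List (List Char)) :
    (l.map String.ofList).headD "" = String.ofList (l.headD []) := by
  cases l <;> rfl

lemma defsender_alt_eq (line : String) :
    defsender_alt line
      = String.ofList (((line.toList.takeWhile (fun c => !(c == '!'))).filter (fun c => !(c == ':')))) := by
  show PySem.Str.replace (((PySem.Str.splitMax? line "!" 1).getD []).headD "") ":" "" = _
  have hsplit : PySem.Str.splitMax? line "!" 1
      = some ((PySem.Chars.splitOnMax line.toList ['!'] 1).map String.ofList) := by
    simp [PySem.Str.splitMax?, PySem.Chars.splitMax?]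
  rw [hsplit]
  simp only [Option.getD_some, headD_map_ofList]
  have hhead : (PySem.Chars.splitOnMax line.toList ['!'] 1).headD []
      = line.toList.takeWhile (fun c => !(c == '!')) := by
    simpa [PySem.Chars.splitOnMax] using
      splitgo_one line.toList [] (line.toList.length + 1) (by omega)
  rw [hhead]
  simp [PySem.Str.replace, replace_colon]

-- ===== VERDICT (by name: the statement is the Claim_ definition above) =====
theorem defsender_spec : Claim_equal_defsender := by
  intro line _
  show defsender line = defsender_alt line
  rw [defsender_alt_eq, defsender, defsenderGo_eq]
  simp
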